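-- pv_equiv track=rewrite | github.com/jsnjuan/Competitive-Programming | Google'sCodingCompetitions/KickStart/2022/Round A/OnSite/SpeedTyping_5_9pts.py | gen_sol
-- ===== SOURCE A (Python) =====
-- def gen_sol(I, P):
--     pos = 0
--     ln_P = len(P)
--     sol = 0
--     for l in I:
--         if pos>=ln_P:
--             return "IMPOSSIBLE"
--         if l == P[pos]:
--             pos+=1
--             continue
--         while pos<ln_P and P[pos]!=l:
--             pos+=1
--             sol+=1
--         if pos>=ln_P:
--             return "IMPOSSIBLE"
--         if pos<ln_P and l!=P[pos]:
--             return "IMPOSSIBLE"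
--         if pos<ln_P and l==P[pos]:
--             pos +=1
--     sol += ln_P - pos
--     return f'{sol}'
-- ===== SOURCE B (Python) =====
-- def gen_sol(I, P):
--     pos = {}
--     for i, c in enumerate(P):
--         pos.setdefault(c, []).append(i)
--     ptr = {}
--     last = -1
--     for c in I:
--         lst = pos.get(c)
--         if lst is None:
--             return "IMPOSSIBLE"
--         k = ptr.get(c, 0)
--         while k < len(lst) and lst[k] <= last:
--             k += 1
--         if k == len(lst):
--             return "IMPOSSIBLE"
--         last = lst[k]
--         ptr[c] = k + 1
--     return f'{len(P) - len(I)}'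
-- ===== Notes on version B (the rewrite author's own statement) =====
-- stated objective: alternative
-- what changed: Builds a char->sorted-position-list index of P once, then matches I by advancing a per-character pointer into its own position list (no scan over P during matching) and returns the closed form len(P)-len(I) instead of A's skip-counter state machine.
import Mathlib
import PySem

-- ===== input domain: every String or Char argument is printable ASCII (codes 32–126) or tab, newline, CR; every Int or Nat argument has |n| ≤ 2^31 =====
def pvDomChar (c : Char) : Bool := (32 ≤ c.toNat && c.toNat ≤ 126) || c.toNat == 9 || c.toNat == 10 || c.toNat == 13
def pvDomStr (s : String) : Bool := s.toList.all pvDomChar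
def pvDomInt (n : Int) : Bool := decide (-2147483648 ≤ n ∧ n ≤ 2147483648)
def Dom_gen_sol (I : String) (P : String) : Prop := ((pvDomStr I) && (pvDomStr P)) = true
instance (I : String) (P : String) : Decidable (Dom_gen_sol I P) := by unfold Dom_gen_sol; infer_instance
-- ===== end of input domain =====

-- B replaces A's skip-counter scan of P by a char→position-list index of P built once,
-- matched with per-character pointers, and the closed form len(P)-len(I); objective: alternative.

-- ===== PORT A =====
-- the inner `while pos<ln_P and P[pos]!=l: pos+=1; sol+=1` loop
def genSolWhile (Pl : List Char) (l : Char) (pos sol : Nat) : Nat × Nat :=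
  if h : pos < Pl.length ∧ Pl[pos]! ≠ l then genSolWhile Pl l (pos + 1) (sol + 1)
  else (pos, sol)
termination_by Pl.length - pos
decreasing_by omega

-- the `for l in I` loop, carrying pos and sol; the trailing `sol += ln_P - pos; return f'{sol}'`
def genSolLoop (Pl : List Char) : List Char → Nat → Nat → String
  | [], pos, sol => PySem.Int.toStr ((sol + (Pl.length - pos) : Nat) : Int)
  | l :: ls, pos, sol =>
    if pos ≥ Pl.length then "IMPOSSIBLE"
    else if l = Pl[pos]! then genSolLoop Pl ls (pos + 1) sol
    else
      let ps := genSolWhile Pl l pos sol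
      if ps.1 ≥ Pl.length then "IMPOSSIBLE"
      else if ps.1 < Pl.length ∧ l ≠ Pl[ps.1]! then "IMPOSSIBLE"
      else if ps.1 < Pl.length ∧ l = Pl[ps.1]! then genSolLoop Pl ls (ps.1 + 1) ps.2
      else PySem.Int.toStr ((ps.2 + (Pl.length - ps.1) : Nat) : Int)

def gen_sol (I : String) (P : String) : String :=
  genSolLoop P.toList I.toList 0 0

-- ===== PORT B =====
-- `for i, c in enumerate(P): pos.setdefault(c, []).append(i)`
def buildPos (Pl : List Char) : PySem.Dict Char (List Int) :=
  (PySem.List.enumerate Pl 0).foldl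
    (fun d ic => d.modify ic.2 [] (· ++ [ic.1])) PySem.Dict.empty

-- `while k < len(lst) and lst[k] <= last: k += 1`
def bAdvance (lst : List Int) (last : Int) (k : Nat) : Nat :=
  if h : k < lst.length ∧ lst[k]! ≤ last then bAdvance lst last (k + 1) else k
termination_by lst.length - k
decreasing_by omega

-- the `for c in I` loop over the index, carrying ptr and last; then `return f'{len(P)-len(I)}'`
def bLoop (posD : PySem.Dict Char (List Int)) (lenP lenI : Nat) :
    List Char → PySem.Dict Char Nat → Int → String
  | [], _, _ => PySem.Int.toStr ((lenP : Int) - (lenI : Int))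
  | c :: cs, ptrD, last =>
    match posD.get? c with
    | none => "IMPOSSIBLE"
    | some lst =>
      let k := bAdvance lst last (ptrD.getD c 0)
      if k = lst.length then "IMPOSSIBLE"
      else bLoop posD lenP lenI cs (ptrD.insert c (k + 1)) (lst[k]!)

def gen_sol_alt (I : String) (P : String) : String :=
  bLoop (buildPos P.toList) P.toList.length I.toList.length I.toList PySem.Dict.empty (-1)

-- ===== PRECONDITION & SPEC =====
def Spec_gen_sol (I : String) (P : String) (out : String) : Prop := out = gen_sol_alt I P
instance (I : String) (P : String) (out : String) : Decidable (Spec_gen_sol I P out) := by unfold Spec_gen_sol; infer_instance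

-- ===== CLAIM (what is proved, stated in full; the proofs are below) =====
def Claim_equal_gen_sol : Prop := ∀ (I : String) (P : String), Dom_gen_sol I P → Spec_gen_sol I P (gen_sol I P)

-- ===== LEMMAS AND PROOFS =====

-- proof-side middle ground: a plain subsequence test
def consumeIter (c : Char) : List Char → Option (List Char)
  | [] => none
  | p :: ps => if p = c then some ps else consumeIter c ps

def isSubseq : List Char → List Char → Bool
  | [], _ => true
  | c :: cs, ps =>
    match consumeIter c ps with
    | none => false
    | some ps' => isSubseq cs ps'

-- ===== A = subsequence test (lemmas from the A side) =====

theorem dropWhile_head_false {f : Char → Bool} : ∀ (xs : List Char) (y : Char) (t : List Char),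
    xs.dropWhile f = y :: t → f y = false := by
  intro xs
  induction xs with
  | nil => intro y t h; simp [List.dropWhile] at h
  | cons x xs ih =>
    intro y t h
    by_cases hx : f x = true
    · rw [List.dropWhile_cons_of_pos hx] at h; exact ih y t h
    · rw [List.dropWhile_cons_of_neg hx] at h
      cases h; simpa using hx

theorem consumeIter_eq_dropWhile (l : Char) : ∀ (xs : List Char),
    consumeIter l xs = (xs.dropWhile (fun p => p != l)).tail? := by
  intro xs
  induction xs with
  | nil => simp [consumeIter, List.dropWhile]
  | cons x xs ih =>
    by_cases hx : x = l
    · simp [consumeIter, hx, List.dropWhile]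
    · have hb : (x != l) = true := by simp [hx]
      simp [consumeIter, hx, List.dropWhile, hb, ih]

theorem isSubseq_length_le : ∀ (ls rest : List Char),
    isSubseq ls rest = true → ls.length ≤ rest.length := by
  intro ls
  induction ls with
  | nil => intro rest _; simp
  | cons c cs ih =>
    intro rest h
    unfold isSubseq at h
    cases hc : consumeIter c rest with
    | none => rw [hc] at h; simp at h
    | some rest' =>
      rw [hc] at h
      have h1 : cs.length ≤ rest'.length := ih rest' h
      have h2 : rest'.length + 1 ≤ rest.length := by
        clear ih h h1
        induction rest generalizing rest' with
        | nil => simp [consumeIter] at hc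
        | cons p ps ihp =>
          unfold consumeIter at hc
          by_cases hp : p = c
          · simp [hp] at hc; simp [hc]
          · simp [hp] at hc
            have := ihp _ hc
            simp; omega
      simp; omega

theorem genSolWhile_spec (Pl : List Char) (l : Char) : ∀ (n pos sol : Nat),
    Pl.length - pos ≤ n → pos ≤ Pl.length →
    ∃ k, genSolWhile Pl l pos sol = (pos + k, sol + k) ∧ pos + k ≤ Pl.length ∧
      Pl.drop (pos + k) = (Pl.drop pos).dropWhile (fun p => p != l) := by
  intro n
  induction n with
  | zero =>
    intro pos sol hn hle
    have hpos : pos = Pl.length := by omega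
    refine ⟨0, ?_, by omega, ?_⟩
    · rw [genSolWhile]; rw [dif_neg (by omega)]; simp
    · subst hpos; simp
  | succ n ih =>
    intro pos sol hn hle
    rw [genSolWhile]
    by_cases h : pos < Pl.length ∧ Pl[pos]! ≠ l
    · rw [dif_pos h]
      obtain ⟨hlt, hne⟩ := h
      obtain ⟨k, hk1, hk2, hk3⟩ := ih (pos + 1) (sol + 1) (by omega) (by omega)
      refine ⟨k + 1, ?_, by omega, ?_⟩
      · rw [hk1]; simp only [Prod.mk.injEq]; omega
      · have hget : Pl[pos]! = Pl[pos] := getElem!_pos Pl pos hlt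
        have hdrop : Pl.drop pos = Pl[pos] :: Pl.drop (pos + 1) :=
          List.drop_eq_getElem_cons hlt
        rw [hdrop, List.dropWhile_cons_of_pos (by rw [← hget]; simpa using hne)]
        rw [show pos + (k + 1) = pos + 1 + k by omega]
        exact hk3
    · rw [dif_neg h]
      refine ⟨0, by simp, by omega, ?_⟩
      simp only [Nat.add_zero]
      by_cases hlt : pos < Pl.length
      · have hget : Pl[pos]! = Pl[pos] := getElem!_pos Pl pos hlt
        have heq : Pl[pos]! = l := by
          by_contra hne; exact h ⟨hlt, hne⟩
        have hdrop : Pl.drop pos = Pl[pos] :: Pl.drop (pos + 1) :=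
          List.drop_eq_getElem_cons hlt
        rw [hdrop, List.dropWhile_cons_of_neg (by rw [← hget]; simp [heq])]
      · have : Pl.drop pos = [] := List.drop_eq_nil_of_le (by omega)
        simp [this]

theorem isSubseq_cons_some {c : Char} {cs ps ps' : List Char}
    (h : consumeIter c ps = some ps') : isSubseq (c :: cs) ps = isSubseq cs ps' := by
  simp only [isSubseq, h]

theorem isSubseq_cons_none {c : Char} {cs ps : List Char}
    (h : consumeIter c ps = none) : isSubseq (c :: cs) ps = false := by
  unfold isSubseq; rw [h]

theorem genSolLoop_spec (Pl : List Char) : ∀ (ls : List Char) (pos sol : Nat),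
    pos ≤ Pl.length →
    genSolLoop Pl ls pos sol =
      if isSubseq ls (Pl.drop pos) then
        PySem.Int.toStr ((sol + (Pl.length - pos) - ls.length : Nat) : Int)
      else "IMPOSSIBLE" := by
  intro ls
  induction ls with
  | nil =>
    intro pos sol hle
    simp [genSolLoop, isSubseq]
  | cons l ls ih =>
    intro pos sol hle
    unfold genSolLoop
    by_cases hpos : pos ≥ Pl.length
    · rw [if_pos hpos]
      have hnil : Pl.drop pos = [] := List.drop_eq_nil_of_le hpos
      rw [hnil, isSubseq_cons_none (by rfl)]
      simp
    · rw [if_neg hpos]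
      have hlt : pos < Pl.length := by omega
      have hget : Pl[pos]! = Pl[pos] := getElem!_pos Pl pos hlt
      have hdrop : Pl.drop pos = Pl[pos] :: Pl.drop (pos + 1) :=
        List.drop_eq_getElem_cons hlt
      by_cases hmatch : l = Pl[pos]!
      · rw [if_pos hmatch]
        have hcons : consumeIter l (Pl.drop pos) = some (Pl.drop (pos + 1)) := by
          rw [hdrop]; simp [consumeIter, ← hget, hmatch]
        rw [ih (pos + 1) sol (by omega), isSubseq_cons_some hcons]
        by_cases hsub : isSubseq ls (Pl.drop (pos + 1)) = true
        · rw [if_pos hsub, if_pos hsub]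
          have hlen : ls.length ≤ (Pl.drop (pos + 1)).length :=
            isSubseq_length_le ls _ hsub
          rw [List.length_drop] at hlen
          congr 2
          simp only [List.length_cons]
          omega
        · rw [if_neg hsub, if_neg hsub]
      · rw [if_neg hmatch]
        obtain ⟨k, hw1, hw2, hw3⟩ :=
          genSolWhile_spec Pl l (Pl.length - pos) pos sol (by omega) hle
        simp only [hw1]
        have hcons0 : consumeIter l (Pl.drop pos) = (Pl.drop (pos + k)).tail? := by
          rw [consumeIter_eq_dropWhile, hw3]
        by_cases hend : pos + k ≥ Pl.length
        · rw [if_pos hend]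
          have hnil : Pl.drop (pos + k) = [] := List.drop_eq_nil_of_le hend
          have : consumeIter l (Pl.drop pos) = none := by rw [hcons0, hnil]; rfl
          rw [isSubseq_cons_none this]
          simp
        · rw [if_neg hend]
          have hlt2 : pos + k < Pl.length := by omega
          have hget2 : Pl[pos + k]! = Pl[pos + k] := getElem!_pos Pl _ hlt2
          have hdrop2 : Pl.drop (pos + k) = Pl[pos + k] :: Pl.drop (pos + k + 1) :=
            List.drop_eq_getElem_cons hlt2
          have hhead : Pl[pos + k]! = l := by
            have := dropWhile_head_false (f := fun p => p != l) (Pl.drop pos)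
              (Pl[pos + k]) (Pl.drop (pos + k + 1)) (by rw [← hw3, hdrop2])
            simp at this
            rw [hget2, this]
          rw [if_neg (fun hc => hc.2 hhead.symm), if_pos ⟨hlt2, hhead.symm⟩]
          have hcons : consumeIter l (Pl.drop pos) = some (Pl.drop (pos + k + 1)) := by
            rw [hcons0, hdrop2]; rfl
          rw [ih (pos + k + 1) (sol + k) (by omega), isSubseq_cons_some hcons]
          by_cases hsub : isSubseq ls (Pl.drop (pos + k + 1)) = true
          · rw [if_pos hsub, if_pos hsub]
            have hlen : ls.length ≤ (Pl.drop (pos + k + 1)).length :=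
              isSubseq_length_le ls _ hsub
            rw [List.length_drop] at hlen
            congr 2
            simp only [List.length_cons]
            omega
          · rw [if_neg hsub, if_neg hsub]

-- ===== B = subsequence test (lemmas from the B side) =====

-- the positions of c in Pl, ascending, as the index builds them
def occs (Pl : List Char) (c : Char) : List Int :=
  ((PySem.List.enumerate Pl 0).filter (fun p => p.2 == c)).map (·.1)

theorem buildPos_getD (Pl : List Char) (c : Char) :
    (buildPos Pl).getD c [] = occs Pl c := by
  unfold buildPos occs
  rw [show ((PySem.List.enumerate Pl 0).foldl
      (fun d ic => d.modify ic.2 [] (· ++ [ic.1])) PySem.Dict.empty)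
    = (((PySem.List.enumerate Pl 0).map (fun ic => (ic.2, ic.1))).foldl
      (fun d p => d.modify p.1 [] (· ++ [p.2])) PySem.Dict.empty) by
    rw [List.foldl_map]]
  rw [PySem.Dict.getD_foldl_modify_append]
  simp only [PySem.Dict.getD_empty, List.nil_append, List.filter_map, List.map_map]
  rfl

theorem occs_sorted (Pl : List Char) (c : Char) : (occs Pl c).Pairwise (· < ·) := by
  unfold occs
  rw [List.pairwise_map]
  exact (PySem.List.pairwise_lt_enumerate Pl 0).filter _

theorem mem_occs (Pl : List Char) (c : Char) (i : Int) :
    i ∈ occs Pl c ↔ ∃ (k : Nat) (h : k < Pl.length), i = (k : Int) ∧ Pl[k] = c := by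
  unfold occs
  simp only [List.mem_map, List.mem_filter, PySem.List.mem_enumerate_iff]
  constructor
  · rintro ⟨p, ⟨⟨k, hk, rfl⟩, hc⟩, rfl⟩
    exact ⟨k, hk, by simp, by simpa using hc⟩
  · rintro ⟨k, hk, rfl, hc⟩
    exact ⟨((k : Int), c), ⟨⟨k, hk, by simp [hc]⟩, by simp⟩, rfl⟩

theorem bAdvance_spec (lst : List Int) (last : Int) : ∀ (n k0 : Nat),
    lst.length - k0 ≤ n → k0 ≤ lst.length → (∀ j, j < k0 → lst[j]! ≤ last) →
    ∃ k, bAdvance lst last k0 = k ∧ k ≤ lst.length ∧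
      (∀ j, j < k → lst[j]! ≤ last) ∧ (∀ h : k < lst.length, last < lst[k]) := by
  intro n
  induction n with
  | zero =>
    intro k0 hn hle hpre
    refine ⟨k0, ?_, hle, hpre, fun h => absurd h (by omega)⟩
    rw [bAdvance, dif_neg (by omega)]
  | succ n ih =>
    intro k0 hn hle hpre
    rw [bAdvance]
    by_cases h : k0 < lst.length ∧ lst[k0]! ≤ last
    · rw [dif_pos h]
      refine ih (k0 + 1) (by omega) (by omega) ?_
      intro j hj
      rcases Nat.lt_or_ge j k0 with hj' | hj'
      · exact hpre j hj'
      · have : j = k0 := by omega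
        subst this; exact h.2
    · rw [dif_neg h]
      refine ⟨k0, rfl, hle, hpre, ?_⟩
      intro hlt
      have := not_and.mp h hlt
      rw [not_le] at this
      rwa [getElem!_pos lst k0 hlt] at this

theorem consumeIter_none_of_not_mem {c : Char} : ∀ {xs : List Char},
    c ∉ xs → consumeIter c xs = none := by
  intro xs
  induction xs with
  | nil => intro _; rfl
  | cons x xs ih =>
    intro h
    simp only [List.mem_cons, not_or] at h
    simp only [consumeIter, if_neg (fun he : x = c => h.1 he.symm)]
    exact ih h.2

-- first occurrence of c at or after s is at km  ⇒  dropWhile lands exactly there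

theorem dropWhile_drop_firstOcc (Pl : List Char) (c : Char) : ∀ (d s km : Nat),
    km - s ≤ d → s ≤ km → (hkm : km < Pl.length) → Pl[km] = c →
    (∀ j (h : j < Pl.length), s ≤ j → j < km → Pl[j] ≠ c) →
    (Pl.drop s).dropWhile (fun p => p != c) = Pl.drop km := by
  intro d
  induction d with
  | zero =>
    intro s km hd hs hkm hc _
    have : s = km := by omega
    subst this
    rw [List.drop_eq_getElem_cons hkm, List.dropWhile_cons_of_neg (by simp [hc])]
  | succ d ih =>
    intro s km hd hs hkm hc hmin
    rcases Nat.eq_or_lt_of_le hs with he | hlt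
    · subst he
      rw [List.drop_eq_getElem_cons hkm, List.dropWhile_cons_of_neg (by simp [hc])]
    · have hsl : s < Pl.length := by omega
      rw [List.drop_eq_getElem_cons hsl,
        List.dropWhile_cons_of_pos (by simpa using hmin s hsl le_rfl hlt)]
      exact ih (s + 1) km (by omega) (by omega) hkm hc
        (fun j h hj hj2 => hmin j h (by omega) hj2)

def bInv (Pl : List Char) (ptrD : PySem.Dict Char Nat) (last : Int) : Prop :=
  -1 ≤ last ∧ ∀ c : Char, ∀ j, j < ptrD.getD c 0 →
    ∃ h : j < (occs Pl c).length, (occs Pl c)[j] ≤ last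

-- c has no occurrence in Pl at or after position s  (used twice below)

theorem not_mem_drop_of_no_occ (Pl : List Char) (c : Char) (s : Nat)
    (h : ∀ (j : Nat) (hj : j < Pl.length), s ≤ j → Pl[j] ≠ c) :
    c ∉ Pl.drop s := by
  intro hmem
  obtain ⟨t, ht, htc⟩ := List.mem_iff_getElem.mp hmem
  rw [List.getElem_drop] at htc
  have hlen : s + t < Pl.length := by
    have := ht; rw [List.length_drop] at this; omega
  exact h (s + t) hlen (by omega) htc

theorem bLoop_spec (Pl : List Char) (lenI : Nat) : ∀ (cs : List Char)
    (ptrD : PySem.Dict Char Nat) (last : Int), bInv Pl ptrD last →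
    bLoop (buildPos Pl) Pl.length lenI cs ptrD last =
      if isSubseq cs (Pl.drop (last + 1).toNat) then
        PySem.Int.toStr ((Pl.length : Int) - (lenI : Int))
      else "IMPOSSIBLE" := by
  intro cs
  induction cs with
  | nil =>
    intro ptrD last _
    simp [bLoop, isSubseq]
  | cons c cs ih =>
    intro ptrD last hinv
    obtain ⟨hlast, hptr⟩ := hinv
    have hgetD : (buildPos Pl).getD c [] = occs Pl c := buildPos_getD Pl c
    unfold bLoop
    cases hget : (buildPos Pl).get? c with
    | none =>
      have hLnil : occs Pl c = [] := by
        rw [← hgetD, PySem.Dict.getD_eq_get?_getD, hget]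
        rfl
      have hnone : consumeIter c (Pl.drop (last + 1).toNat) = none := by
        apply consumeIter_none_of_not_mem
        apply not_mem_drop_of_no_occ
        intro j hj _ hjc
        have : ((j : Nat) : Int) ∈ occs Pl c := (mem_occs Pl c j).mpr ⟨j, hj, rfl, hjc⟩
        simp [hLnil] at this
      rw [isSubseq_cons_none hnone]
      simp
    | some lst =>
      have hlst : lst = occs Pl c := by
        have := hgetD
        rw [PySem.Dict.getD_eq_get?_getD, hget] at this
        simpa using this
      have hk0le : ptrD.getD c 0 ≤ lst.length := by
        rcases Nat.eq_zero_or_pos (ptrD.getD c 0) with h0 | h0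
        · omega
        · obtain ⟨hlen, _⟩ := hptr c (ptrD.getD c 0 - 1) (by omega)
          rw [← hlst] at hlen; omega
      have hk0pre : ∀ j, j < ptrD.getD c 0 → lst[j]! ≤ last := by
        intro j hj
        obtain ⟨hlen, hle⟩ := hptr c j hj
        rw [hlst, getElem!_pos (occs Pl c) j hlen]
        exact hle
      obtain ⟨k, hk, hkle, hall, hgt⟩ :=
        bAdvance_spec lst last lst.length (ptrD.getD c 0) (by omega) hk0le hk0pre
      simp only [hk]
      by_cases hend : k = lst.length
      · rw [if_pos hend]
        have hnone : consumeIter c (Pl.drop (last + 1).toNat) = none := by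
          apply consumeIter_none_of_not_mem
          apply not_mem_drop_of_no_occ
          intro j hj hjs hjc
          have hmem : ((j : Nat) : Int) ∈ occs Pl c := (mem_occs Pl c j).mpr ⟨j, hj, rfl, hjc⟩
          rw [← hlst] at hmem
          obtain ⟨t, ht, htj⟩ := List.mem_iff_getElem.mp hmem
          have := hall t (by omega)
          rw [getElem!_pos lst t ht, htj] at this
          omega
        rw [isSubseq_cons_none hnone]
        simp
      · rw [if_neg hend]
        have hklt : k < lst.length := by omega
        have hget! : lst[k]! = lst[k] := getElem!_pos lst k hklt
        have hmem : lst[k] ∈ occs Pl c := by rw [← hlst]; exact List.getElem_mem hklt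
        obtain ⟨km, hkm, hkmv, hkmc⟩ := (mem_occs Pl c _).mp hmem
        have hm : last < lst[k] := hgt hklt
        have hskm : (last + 1).toNat ≤ km := by omega
        -- minimality of km among occurrences ≥ s
        have hmin : ∀ (j : Nat) (h : j < Pl.length),
            (last + 1).toNat ≤ j → j < km → Pl[j] ≠ c := by
          intro j hj hjs hjkm hjc
          have hjmem : ((j : Nat) : Int) ∈ occs Pl c := (mem_occs Pl c j).mpr ⟨j, hj, rfl, hjc⟩
          rw [← hlst] at hjmem
          obtain ⟨t, ht, htj⟩ := List.mem_iff_getElem.mp hjmem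
          rcases Nat.lt_or_ge t k with htk | htk
          · have := hall t (by omega)
            rw [getElem!_pos lst t ht, htj] at this
            omega
          · rcases Nat.eq_or_lt_of_le htk with he | hlt2
            · subst he; rw [htj] at hkmv; omega
            · have hsorted := occs_sorted Pl c
              rw [← hlst] at hsorted
              have := List.pairwise_iff_getElem.mp hsorted k t hklt ht hlt2
              rw [htj, hkmv] at this
              omega
        have hcons : consumeIter c (Pl.drop (last + 1).toNat) = some (Pl.drop (km + 1)) := by
          rw [consumeIter_eq_dropWhile,
            dropWhile_drop_firstOcc Pl c km ((last + 1).toNat) km (by omega) hskm hkm hkmc hmin,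
            List.drop_eq_getElem_cons hkm]
          rfl
        rw [isSubseq_cons_some hcons]
        rw [ih (ptrD.insert c (k + 1)) (lst[k]!) ?_]
        · rw [hget!, hkmv]
          have : ((km : Int) + 1).toNat = km + 1 := by omega
          rw [this]
        · constructor
          · rw [hget!]; omega
          · intro c' j hj
            rw [PySem.Dict.getD_insert] at hj
            by_cases hc' : c' = c
            · subst hc'
              rw [if_pos rfl] at hj
              rcases Nat.lt_or_ge j k with hjk | hjk
              · have := hall j hjk
                rw [getElem!_pos lst j (by omega)] at this
                rw [← hlst]
                exact ⟨by omega, by rw [hget!]; omega⟩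
              · have : j = k := by omega
                subst this
                rw [← hlst]
                exact ⟨hklt, by rw [hget!]⟩
            · rw [if_neg hc'] at hj
              obtain ⟨hlen, hle⟩ := hptr c' j hj
              exact ⟨hlen, by rw [hget!]; omega⟩

-- ===== VERDICT (by name: the statement is the Claim_ definition above) =====
theorem gen_sol_spec : Claim_equal_gen_sol := by
  intro I P _
  unfold Spec_gen_sol gen_sol gen_sol_alt
  rw [genSolLoop_spec P.toList I.toList 0 0 (by omega)]
  rw [bLoop_spec P.toList I.toList.length I.toList PySem.Dict.empty (-1)
    ⟨by omega, by intro c j hj; simp [PySem.Dict.getD_empty] at hj⟩]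
  simp only [show ((-1:Int) + 1) = 0 by norm_num, Int.toNat_zero, List.drop_zero]
  by_cases hsub : isSubseq I.toList P.toList = true
  · rw [if_pos hsub, if_pos hsub]
    have hlen : I.toList.length ≤ P.toList.length := isSubseq_length_le _ _ hsub
    congr 1
    omega
  · rw [if_neg hsub, if_neg hsub]
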